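-- pv_equiv track=rewrite | github.com/Docto-Studio/docto-trace-storage | skill/docto-trace-storage/scripts/analyze_report.py | render_action_plan
-- ===== SOURCE A (Python) =====
-- def render_action_plan(report: dict) -> str:
--     plan = report.get("action_plan", [])
--     if not plan:
--         return "## ✅ Action Plan\nNo actions recommended."
--
--     severity_order = {"critical": 0, "warning": 1, "info": 2}
--     sorted_plan = sorted(plan, key=lambda x: severity_order.get(x.get("severity", "info"), 2))
--
--     icons = {"critical": "🔴", "warning": "🟡", "info": "🔵"}
--     lines = [f"## 📋 Action Plan ({len(plan)} items)"]
--     for item in sorted_plan: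
--         sev = item.get("severity", "info")
--         icon = icons.get(sev, "⚪")
--         cat = item.get("category", "").capitalize()
--         desc = item.get("description", "")
--         lines.append(f"- {icon} **[{sev.upper()} / {cat}]** {desc}")
--     return "\n".join(lines)
-- ===== SOURCE B (Python) =====
-- def _line(item):
--     sev = item.get("severity", "info")
--     icon = "🔴" if sev == "critical" else "🟡" if sev == "warning" else "🔵" if sev == "info" else "⚪"
--     return f"- {icon} **[{sev.upper()} / {item.get('category', '').capitalize()}]** {item.get('description', '')}"
--
--
-- def render_action_plan(report: dict) -> str:
--     plan = report.get("action_plan", [])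
--     if not plan:
--         return "## ✅ Action Plan\nNo actions recommended."
--
--     # one pass: format each item immediately and route the finished line
--     # into one of three ordered buckets (no sort, no dict tables)
--     crit, warn, rest = [], [], []
--     for item in plan:
--         sev = item.get("severity", "info")
--         if sev == "critical":
--             crit.append(_line(item))
--         elif sev == "warning":
--             warn.append(_line(item))
--         else:
--             rest.append(_line(item))
--     return "\n".join([f"## 📋 Action Plan ({len(plan)} items)"] + crit + warn + rest)
-- ===== Notes on version B (the rewrite author's own statement) =====
-- stated objective: alternative
-- what changed: Instead of sorting items by a severity-order dict and then running a second formatting loop with dict-based icon lookup, B makes one pass that formats each item immediately (icon chosen by a conditional chain, no dict tables) and routes the finished line into one of three ordered buckets, then joins header and buckets.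
import Mathlib
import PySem

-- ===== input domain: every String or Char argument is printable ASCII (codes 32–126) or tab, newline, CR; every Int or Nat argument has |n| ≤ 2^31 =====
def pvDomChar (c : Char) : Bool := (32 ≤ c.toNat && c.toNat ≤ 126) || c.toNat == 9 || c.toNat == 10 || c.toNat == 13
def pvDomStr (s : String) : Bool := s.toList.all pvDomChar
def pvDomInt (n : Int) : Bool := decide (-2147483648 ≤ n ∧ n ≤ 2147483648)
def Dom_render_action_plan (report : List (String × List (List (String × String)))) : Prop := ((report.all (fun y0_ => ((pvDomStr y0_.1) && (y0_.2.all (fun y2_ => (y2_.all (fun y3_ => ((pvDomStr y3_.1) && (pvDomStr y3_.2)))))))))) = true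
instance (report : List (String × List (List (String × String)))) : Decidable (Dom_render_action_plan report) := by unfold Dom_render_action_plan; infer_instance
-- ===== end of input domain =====

-- B replaces A's sort-then-format (severity-order dict key, second loop, icon dict) by a single
-- pass that formats each item at once (conditional icon chain) and routes the finished line into
-- one of three ordered buckets (alternative decomposition, same output).

-- shared helper for Python's s.capitalize() (both Pythons call it): first char uppercased,
-- remainder lowercased — exact on the ASCII domain (no titlecase/locale cases there)
def pvCapitalize (s : String) : String :=
  match s.toList with
  | [] => s
  | c :: rest => String.ofList (PySem.Chars.upperChar c :: PySem.Chars.lower rest)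

-- ===== PORT A =====
def render_action_plan (report : List (String × List (List (String × String)))) : String :=
  let plan := (PySem.Dict.mk report).getD "action_plan" []
  if plan = [] then "## ✅ Action Plan\nNo actions recommended."
  else
    let severity_order : PySem.Dict String Int :=
      PySem.Dict.ofList [("critical", 0), ("warning", 1), ("info", 2)]
    let sorted_plan := PySem.List.sorted plan
      (fun x => severity_order.getD ((PySem.Dict.mk x).getD "severity" "info") 2) false
    let icons : PySem.Dict String String :=
      PySem.Dict.ofList [("critical", "🔴"), ("warning", "🟡"), ("info", "🔵")]
    let lines := ["## 📋 Action Plan (" ++ PySem.Int.toStr (plan.length : Int) ++ " items)"]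
    let lines := sorted_plan.foldl (fun ls item =>
      let sev := (PySem.Dict.mk item).getD "severity" "info"
      let icon := icons.getD sev "⚪"
      let cat := pvCapitalize ((PySem.Dict.mk item).getD "category" "")
      let desc := (PySem.Dict.mk item).getD "description" ""
      ls ++ ["- " ++ icon ++ " **[" ++ PySem.Str.upper sev ++ " / " ++ cat ++ "]** " ++ desc]) lines
    PySem.Str.join "\n" lines

-- ===== PORT B =====
-- Source B's helper _line: format one item, icon by a conditional chain
def pvLine (item : List (String × String)) : String :=
  let sev := (PySem.Dict.mk item).getD "severity" "info"
  let icon := if sev = "critical" then "🔴"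
              else if sev = "warning" then "🟡"
              else if sev = "info" then "🔵" else "⚪"
  "- " ++ icon ++ " **[" ++ PySem.Str.upper sev ++ " / "
    ++ pvCapitalize ((PySem.Dict.mk item).getD "category" "") ++ "]** "
    ++ (PySem.Dict.mk item).getD "description" ""

def render_action_plan_alt (report : List (String × List (List (String × String)))) : String :=
  let plan := (PySem.Dict.mk report).getD "action_plan" []
  if plan = [] then "## ✅ Action Plan\nNo actions recommended."
  else
    let b := plan.foldl
      (fun (b : List String × List String × List String) item =>
        let sev := (PySem.Dict.mk item).getD "severity" "info"
        if sev = "critical" then (b.1 ++ [pvLine item], b.2.1, b.2.2)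
        else if sev = "warning" then (b.1, b.2.1 ++ [pvLine item], b.2.2)
        else (b.1, b.2.1, b.2.2 ++ [pvLine item]))
      ([], [], [])
    PySem.Str.join "\n"
      (("## 📋 Action Plan (" ++ PySem.Int.toStr (plan.length : Int) ++ " items)")
        :: (b.1 ++ b.2.1 ++ b.2.2))

-- ===== PRECONDITION & SPEC =====
def Spec_render_action_plan (report : List (String × List (List (String × String)))) (out : String) : Prop := out = render_action_plan_alt report
instance (report : List (String × List (List (String × String)))) (out : String) : Decidable (Spec_render_action_plan report out) := by unfold Spec_render_action_plan; infer_instance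

-- ===== CLAIM (what is proved, stated in full; the proofs are below) =====
def Claim_equal_render_action_plan : Prop := ∀ (report : List (String × List (List (String × String)))), Dom_render_action_plan report → Spec_render_action_plan report (render_action_plan report)

-- ===== LEMMAS AND PROOFS =====

-- the severity string of an item
def pvSev (x : List (String × String)) : String := (PySem.Dict.mk x).getD "severity" "info"

-- the sort key A uses
def pvKey (x : List (String × String)) : Int :=
  (PySem.Dict.ofList [("critical", (0 : Int)), ("warning", 1), ("info", 2)]).getD (pvSev x) 2

lemma pvKey_eq (x : List (String × String)) :
    pvKey x = if pvSev x = "critical" then 0 else if pvSev x = "warning" then 1 else 2 := by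
  have hd : PySem.Dict.ofList [("critical", (0 : Int)), ("warning", 1), ("info", 2)]
      = PySem.Dict.mk [("critical", 0), ("warning", 1), ("info", 2)] := by decide
  unfold pvKey
  rw [hd]
  generalize pvSev x = s
  by_cases h1 : s = "critical"
  · subst h1; decide
  by_cases h2 : s = "warning"
  · subst h2; simp [h1]; decide
  by_cases h3 : s = "info"
  · subst h3; simp [h1, h2]; decide
  simp [PySem.Dict.getD_eq_get?_getD, PySem.Dict.get?,
    Ne.symm h1, Ne.symm h2, Ne.symm h3, h1, h2]

lemma pvKey_cases (x : List (String × String)) : pvKey x = 0 ∨ pvKey x = 1 ∨ pvKey x = 2 := by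
  rw [pvKey_eq]; split_ifs <;> simp

-- A's per-item format equals Source B's _line
lemma pvFmt_eq (item : List (String × String)) :
    ("- " ++ (PySem.Dict.ofList [("critical", "🔴"), ("warning", "🟡"), ("info", "🔵")]).getD
        ((PySem.Dict.mk item).getD "severity" "info") "⚪"
      ++ " **[" ++ PySem.Str.upper ((PySem.Dict.mk item).getD "severity" "info") ++ " / "
      ++ pvCapitalize ((PySem.Dict.mk item).getD "category" "") ++ "]** "
      ++ (PySem.Dict.mk item).getD "description" "")
    = pvLine item := by
  have hd : PySem.Dict.ofList [("critical", "🔴"), ("warning", "🟡"), ("info", "🔵")]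
      = PySem.Dict.mk [("critical", "🔴"), ("warning", "🟡"), ("info", "🔵")] := by decide
  unfold pvLine
  rw [hd]
  simp only
  congr 5
  generalize (PySem.Dict.mk item).getD "severity" "info" = s
  by_cases h1 : s = "critical"
  · subst h1; decide
  by_cases h2 : s = "warning"
  · subst h2; simp [h1]; decide
  by_cases h3 : s = "info"
  · subst h3; simp [h1, h2]; decide
  simp [PySem.Dict.getD_eq_get?_getD, PySem.Dict.get?,
    Ne.symm h1, Ne.symm h2, Ne.symm h3, h1, h2, h3]

lemma pvInsertBy_skip {α : Type} (before : α → α → Bool) (x : α) (pre suf : List α)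
    (h : ∀ y ∈ pre, before x y = false) :
    PySem.List.insertBy before x (pre ++ suf) = pre ++ PySem.List.insertBy before x suf := by
  induction pre with
  | nil => simp
  | cons y ys ih =>
    have unf : PySem.List.insertBy before x (y :: (ys ++ suf))
        = if before x y = true then x :: y :: (ys ++ suf)
          else y :: PySem.List.insertBy before x (ys ++ suf) := rfl
    simp [unf, h y (by simp), ih (fun z hz => h z (by simp [hz]))]

lemma pvInsertBy_front {α : Type} (before : α → α → Bool) (x : α) (ys : List α)
    (h : ∀ y ∈ ys, before x y = true) :
    PySem.List.insertBy before x ys = x :: ys := by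
  cases ys with
  | nil => rfl
  | cons y t => simp [PySem.List.insertBy, h y (by simp)]

-- one insertion step keeps the three-bucket shape
lemma pvFoldl_insertBy_buckets (k : List (String × String) → Int)
    (hk : ∀ x, k x = 0 ∨ k x = 1 ∨ k x = 2)
    (l A0 A1 A2 : List (List (String × String)))
    (h0 : ∀ a ∈ A0, k a = 0) (h1 : ∀ a ∈ A1, k a = 1) (h2 : ∀ a ∈ A2, k a = 2) :
    l.foldl (fun acc x => PySem.List.insertBy (fun a b => decide (k a < k b)) x acc) (A0 ++ A1 ++ A2)
      = (A0 ++ l.filter (fun x => decide (k x = 0)))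
        ++ (A1 ++ l.filter (fun x => decide (k x = 1)))
        ++ (A2 ++ l.filter (fun x => decide (k x = 2))) := by
  induction l generalizing A0 A1 A2 with
  | nil => simp
  | cons x l ih =>
    simp only [List.foldl_cons, List.filter_cons]
    rcases hk x with hx | hx | hx
    · have step : PySem.List.insertBy (fun a b => decide (k a < k b)) x (A0 ++ A1 ++ A2)
          = (A0 ++ [x]) ++ A1 ++ A2 := by
        rw [List.append_assoc, pvInsertBy_skip _ x A0 (A1 ++ A2)
          (by intro y hy; simp [h0 y hy, hx]),
          pvInsertBy_front _ x (A1 ++ A2) (by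
            intro y hy; rcases List.mem_append.mp hy with h | h
            · simp [h1 y h, hx]
            · simp [h2 y h, hx])]
        simp
      rw [step, ih (A0 ++ [x]) A1 A2
        (by intro a ha; rcases List.mem_append.mp ha with h | h
            · exact h0 a h
            · simp_all) h1 h2]
      simp [hx]
    · have step : PySem.List.insertBy (fun a b => decide (k a < k b)) x (A0 ++ A1 ++ A2)
          = A0 ++ (A1 ++ [x]) ++ A2 := by
        rw [List.append_assoc, pvInsertBy_skip _ x A0 (A1 ++ A2)
          (by intro y hy; simp [h0 y hy, hx]),
          pvInsertBy_skip _ x A1 A2 (by intro y hy; simp [h1 y hy, hx]),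
          pvInsertBy_front _ x A2 (by intro y hy; simp [h2 y hy, hx])]
        simp
      rw [step, ih A0 (A1 ++ [x]) A2 h0
        (by intro a ha; rcases List.mem_append.mp ha with h | h
            · exact h1 a h
            · simp_all) h2]
      simp [hx]
    · have step : PySem.List.insertBy (fun a b => decide (k a < k b)) x (A0 ++ A1 ++ A2)
          = A0 ++ A1 ++ (A2 ++ [x]) := by
        rw [PySem.List.insertBy_of_forall_not_before _ x _ (by
          intro y hy
          rcases List.mem_append.mp hy with h | h
          · rcases List.mem_append.mp h with h' | h'
            · simp [h0 y h', hx]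
            · simp [h1 y h', hx]
          · simp [h2 y h, hx])]
        simp
      rw [step, ih A0 A1 (A2 ++ [x]) h0 h1
        (by intro a ha; rcases List.mem_append.mp ha with h | h
            · exact h2 a h
            · simp_all)]
      simp [hx]

-- A's sort = the three filters in order
lemma pvSorted_eq_buckets (k : List (String × String) → Int)
    (hk : ∀ x, k x = 0 ∨ k x = 1 ∨ k x = 2) (l : List (List (String × String))) :
    PySem.List.sorted l k false
      = l.filter (fun x => decide (k x = 0)) ++ l.filter (fun x => decide (k x = 1))
        ++ l.filter (fun x => decide (k x = 2)) := by
  rw [PySem.List.sorted_eq_foldl_insertBy]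
  have := pvFoldl_insertBy_buckets k hk l [] [] [] (by simp) (by simp) (by simp)
  simpa using this

-- B's routing fold = the three filters, formatted
lemma pvFoldlB (l : List (List (String × String))) (b0 b1 b2 : List String) :
    l.foldl
      (fun (b : List String × List String × List String) item =>
        if pvSev item = "critical" then (b.1 ++ [pvLine item], b.2.1, b.2.2)
        else if pvSev item = "warning" then (b.1, b.2.1 ++ [pvLine item], b.2.2)
        else (b.1, b.2.1, b.2.2 ++ [pvLine item])) (b0, b1, b2)
      = (b0 ++ (l.filter (fun x => decide (pvSev x = "critical"))).map pvLine,
         b1 ++ (l.filter (fun x => decide (¬ pvSev x = "critical" ∧ pvSev x = "warning"))).map pvLine,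
         b2 ++ (l.filter (fun x => decide (¬ pvSev x = "critical" ∧ ¬ pvSev x = "warning"))).map pvLine) := by
  induction l generalizing b0 b1 b2 with
  | nil => simp
  | cons x l ih =>
    simp only [List.foldl_cons, List.filter_cons]
    by_cases h1 : pvSev x = "critical"
    · simp [h1, ih]
    · by_cases h2 : pvSev x = "warning" <;> simp [h1, h2, ih]

-- the A-side filters, rewritten to severity-string tests
lemma pvFilter0 (l : List (List (String × String))) :
    l.filter (fun x => decide (pvKey x = 0)) = l.filter (fun x => decide (pvSev x = "critical")) := by
  apply List.filter_congr; intro x _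
  rw [pvKey_eq]; split_ifs <;> simp_all
lemma pvFilter1 (l : List (List (String × String))) :
    l.filter (fun x => decide (pvKey x = 1))
      = l.filter (fun x => decide (¬ pvSev x = "critical" ∧ pvSev x = "warning")) := by
  apply List.filter_congr; intro x _
  rw [pvKey_eq]; split_ifs <;> simp_all
lemma pvFilter2 (l : List (List (String × String))) :
    l.filter (fun x => decide (pvKey x = 2))
      = l.filter (fun x => decide (¬ pvSev x = "critical" ∧ ¬ pvSev x = "warning")) := by
  apply List.filter_congr; intro x _
  rw [pvKey_eq]; split_ifs <;> simp_all

-- ===== VERDICT (by name: the statement is the Claim_ definition above) =====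
theorem render_action_plan_spec : Claim_equal_render_action_plan := by
  intro report _
  unfold Spec_render_action_plan render_action_plan render_action_plan_alt
  by_cases hp : (PySem.Dict.mk report).getD "action_plan" ([] : List (List (String × String))) = []
  · simp [hp]
  · simp only [hp, if_false]
    generalize (PySem.Dict.mk report).getD "action_plan" ([] : List (List (String × String))) = plan at *
    congr 1
    -- rewrite A's formatting fold as a map over the sorted list
    rw [show (fun (ls : List String) (item : List (String × String)) =>
        let sev := (PySem.Dict.mk item).getD "severity" "info"
        let icon := (PySem.Dict.ofList [("critical", "🔴"), ("warning", "🟡"), ("info", "🔵")]).getD sev "⚪"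
        let cat := pvCapitalize ((PySem.Dict.mk item).getD "category" "")
        let desc := (PySem.Dict.mk item).getD "description" ""
        ls ++ ["- " ++ icon ++ " **[" ++ PySem.Str.upper sev ++ " / " ++ cat ++ "]** " ++ desc])
      = (fun ls item => ls ++ [pvLine item]) from funext fun ls => funext fun item => by
        simp only [pvFmt_eq item]]
    rw [PySem.List.foldl_append_singleton_eq_map]
    rw [show (fun x : List (String × String) =>
        (PySem.Dict.ofList [("critical", (0 : Int)), ("warning", 1), ("info", 2)]).getD
          ((PySem.Dict.mk x).getD "severity" "info") 2) = pvKey from rfl]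
    rw [pvSorted_eq_buckets pvKey pvKey_cases plan, pvFilter0, pvFilter1, pvFilter2]
    -- rewrite B's routing fold
    rw [show (fun (b : List String × List String × List String) (item : List (String × String)) =>
        let sev := (PySem.Dict.mk item).getD "severity" "info"
        if sev = "critical" then (b.1 ++ [pvLine item], b.2.1, b.2.2)
        else if sev = "warning" then (b.1, b.2.1 ++ [pvLine item], b.2.2)
        else (b.1, b.2.1, b.2.2 ++ [pvLine item]))
      = (fun (b : List String × List String × List String) item =>
        if pvSev item = "critical" then (b.1 ++ [pvLine item], b.2.1, b.2.2)
        else if pvSev item = "warning" then (b.1, b.2.1 ++ [pvLine item], b.2.2)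
        else (b.1, b.2.1, b.2.2 ++ [pvLine item])) from rfl]
    rw [pvFoldlB plan [] [] []]
    simp
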